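-- pv_equiv track=rewrite | github.com/BeerBoi010/Bep-project | SVM/OVA.final.py | filter_short_labels
-- ===== SOURCE A (Python) =====
-- def filter_short_labels(predictions, min_duration):
--     filtered_predictions = predictions.copy()
--     current_label = predictions[0]
--     current_start = 0
--
--     for i in range(1, len(predictions)):
--         if predictions[i] != current_label:
--             if i - current_start < min_duration:
--                 filtered_predictions[current_start:i] = [filtered_predictions[current_start - 1]] * (i - current_start) if current_start > 0 else [0] * (i - current_start)
--             current_label = predictions[i]
--             current_start = i
--
--     # Check the last segment
--     if len(predictions) - current_start < min_duration:
--         filtered_predictions[current_start:] = [filtered_predictions[current_start - 1]] * (len(predictions) - current_start) if current_start > 0 else [0] * (len(predictions) - current_start)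
--
--     return filtered_predictions
-- ===== SOURCE B (Python) =====
-- def filter_short_labels(predictions, min_duration):
--     # phase 1: collect maximal equal-label runs as (start, end) pairs
--     segments = []
--     start = 0
--     cur = predictions[0]
--     for i in range(1, len(predictions)):
--         if predictions[i] != cur:
--             segments.append((start, i))
--             start, cur = i, predictions[i]
--     segments.append((start, len(predictions)))
--     # phase 2: overwrite each short run in a fresh copy, left to right
--     filtered = predictions.copy()
--     for s, e in segments:
--         if e - s < min_duration:
--             filtered[s:e] = [filtered[s - 1]] * (e - s) if s > 0 else [0] * (e - s)
--     return filtered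
-- ===== Notes on version B (the rewrite author's own statement) =====
-- stated objective: alternative
-- what changed: A mutates the copy inline during a single scan while tracking the current run; B first collects all maximal equal-label runs as (start, end) segments in one pass, then sweeps the segment list and overwrites the short runs in the copy.
import Mathlib
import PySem

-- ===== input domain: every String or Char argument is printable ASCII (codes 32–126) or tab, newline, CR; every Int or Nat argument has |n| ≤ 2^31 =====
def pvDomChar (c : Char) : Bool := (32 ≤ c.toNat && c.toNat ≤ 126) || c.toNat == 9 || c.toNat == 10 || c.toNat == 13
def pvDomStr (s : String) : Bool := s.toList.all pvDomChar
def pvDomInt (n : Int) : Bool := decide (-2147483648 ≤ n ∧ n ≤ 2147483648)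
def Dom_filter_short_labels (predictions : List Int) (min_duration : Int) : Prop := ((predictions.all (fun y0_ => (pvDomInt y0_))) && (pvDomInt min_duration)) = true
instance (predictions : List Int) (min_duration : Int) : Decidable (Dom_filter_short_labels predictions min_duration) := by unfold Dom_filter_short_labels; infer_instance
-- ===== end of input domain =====

-- B replaces A's single inline pass (which mutates the copy while tracking the current run)
-- by a two-phase decomposition: first collect the (start, end) boundaries of all maximal
-- equal-label runs, then sweep that segment list once, overwriting each short run in the copy.
-- Objective: alternative decomposition, same cost.

-- ===== PORT A =====
-- The Python slice assignment
--   filtered[s:e] = [filtered[s-1]]*(e-s) if s > 0 else [0]*(e-s)   (guarded by e - s < min_duration)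
-- appears verbatim in both Pythons; it is transliterated once here (indices are in range,
-- so List.take/drop/getD are exact).
def fslFix (f : List Int) (s e : Nat) (minD : Int) : List Int :=
  if (e : Int) - (s : Int) < minD then
    f.take s ++ (if 0 < s then List.replicate (e - s) (f.getD (s - 1) 0)
                 else List.replicate (e - s) 0) ++ f.drop e
  else f

-- A's loop body: state = (filtered_predictions, current_label, current_start)
def fslStepA (predictions : List Int) (minD : Int)
    (st : List Int × Int × Nat) (i : Nat) : List Int × Int × Nat :=
  if predictions.getD i 0 ≠ st.2.1 then
    (fslFix st.1 st.2.2 i minD, predictions.getD i 0, i)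
  else st

-- predictions[0] on the empty list raises IndexError in Python (excluded by Pre_);
-- getD 0 0 makes the port total there.
def filter_short_labels (predictions : List Int) (min_duration : Int) : List Int :=
  let n := predictions.length
  let st := ((List.range n).drop 1).foldl (fslStepA predictions min_duration)
              (predictions, predictions.getD 0 0, 0)
  fslFix st.1 st.2.2 n min_duration

-- ===== PORT B =====
-- phase-1 loop body: state = (segments, start, cur)
def fslStepB (predictions : List Int)
    (st : List (Nat × Nat) × Nat × Int) (i : Nat) : List (Nat × Nat) × Nat × Int :=
  if predictions.getD i 0 ≠ st.2.2 then
    (st.1 ++ [(st.2.1, i)], i, predictions.getD i 0)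
  else st

-- phase 2: sweep the segment list, overwriting short runs in the copy
def fslApply (predictions : List Int) (minD : Int) (segs : List (Nat × Nat)) : List Int :=
  segs.foldl (fun f se => fslFix f se.1 se.2 minD) predictions

def filter_short_labels_alt (predictions : List Int) (min_duration : Int) : List Int :=
  let n := predictions.length
  let st := ((List.range n).drop 1).foldl (fslStepB predictions)
              ([], 0, predictions.getD 0 0)
  fslApply predictions min_duration (st.1 ++ [(st.2.1, n)])

-- ===== PRECONDITION & SPEC =====
-- Pre_ excludes only the empty list, on which Python A raises IndexError (predictions[0]).
def Pre_filter_short_labels (predictions : List Int) (min_duration : Int) : Prop :=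
  predictions ≠ []
instance (predictions : List Int) (min_duration : Int) : Decidable (Pre_filter_short_labels predictions min_duration) := by unfold Pre_filter_short_labels; infer_instance

def pvWitness_filter_short_labels : List Int × Int := ([1, 1, 2, 3, 3, 3], 2)

def Spec_filter_short_labels (predictions : List Int) (min_duration : Int) (out : List Int) : Prop := out = filter_short_labels_alt predictions min_duration
instance (predictions : List Int) (min_duration : Int) (out : List Int) : Decidable (Spec_filter_short_labels predictions min_duration out) := by unfold Spec_filter_short_labels; infer_instance

-- ===== CLAIM (what is proved, stated in full; the proofs are below) =====
def Claim_equal_filter_short_labels : Prop := ∀ (predictions : List Int) (min_duration : Int), Dom_filter_short_labels predictions min_duration → Pre_filter_short_labels predictions min_duration → Spec_filter_short_labels predictions min_duration (filter_short_labels predictions min_duration)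

-- ===== LEMMAS AND PROOFS =====

-- Deferring the fixes (B) gives the same filtered list as applying them inline (A):
-- A's running filtered list is always `fslApply` of the segments B has collected so far,
-- and the (label, start) bookkeeping coincides.
lemma fsl_key (predictions : List Int) (minD : Int) :
    ∀ (L : List Nat) (segs : List (Nat × Nat)) (s : Nat) (lbl : Int),
      L.foldl (fslStepA predictions minD) (fslApply predictions minD segs, lbl, s)
        = (fslApply predictions minD (L.foldl (fslStepB predictions) (segs, s, lbl)).1,
           (L.foldl (fslStepB predictions) (segs, s, lbl)).2.2,
           (L.foldl (fslStepB predictions) (segs, s, lbl)).2.1) := by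
  intro L
  induction L with
  | nil => intro segs s lbl; rfl
  | cons i L ih =>
    intro segs s lbl
    simp only [List.foldl_cons]
    by_cases h : predictions.getD i 0 ≠ lbl
    all_goals simp only [List.getD] at h
    · have hA : fslStepA predictions minD (fslApply predictions minD segs, lbl, s) i
          = (fslApply predictions minD (segs ++ [(s, i)]), predictions.getD i 0, i) := by
        simp [fslStepA, h, fslApply, List.foldl_append]
      have hB : fslStepB predictions (segs, s, lbl) i
          = (segs ++ [(s, i)], i, predictions.getD i 0) := by
        simp [fslStepB, h]
      rw [hA, hB, ih]
    · have hA : fslStepA predictions minD (fslApply predictions minD segs, lbl, s) i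
          = (fslApply predictions minD segs, lbl, s) := by
        simp [fslStepA, h]
      have hB : fslStepB predictions (segs, s, lbl) i = (segs, s, lbl) := by
        simp [fslStepB, h]
      rw [hA, hB, ih]

-- ===== VERDICT (by name: the statement is the Claim_ definition above) =====
theorem filter_short_labels_spec : Claim_equal_filter_short_labels := by
  intro predictions min_duration _ _
  unfold Spec_filter_short_labels filter_short_labels filter_short_labels_alt
  have h := fsl_key predictions min_duration ((List.range predictions.length).drop 1)
      [] 0 (predictions.getD 0 0)
  have h0 : fslApply predictions min_duration [] = predictions := rfl
  rw [h0] at h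
  simp only [h, fslApply, List.foldl_append, List.foldl_cons, List.foldl_nil]
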